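-- pv_equiv track=rewrite | github.com/BDACOIN/discord.bot | Jack-o-Lantern/Jack_o_Lantern.py | best_wild_hand_reflect_hands
-- ===== SOURCE A (Python) =====
-- def match_original_card(card_copy, best_copy):
--     for x in range(0, len(card_copy)):
--         for y in range(0, len(best_copy)):
--             if card_copy[x] == best_copy[y]:
--                 element = card_copy[x]
--                 card_copy.pop(x)
--                 best_copy.pop(y)
--                 return True, card_copy, best_copy, element
--
--
--     return False, None, None, None
--
-- def best_wild_hand_reflect_hands(cards, bests):
--
--     card_copy = list(cards[:])
--     best_copy = list(bests[:])
--
--     displays_cards = []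
--
--     while(True):
--         has_same, c, b, e = match_original_card(card_copy, best_copy)
--         if not has_same:
--             break
--
--         displays_cards.append(e)
--
--     # 最終的な手札の並びに基づいて…
--     for b in best_copy:
--
--         # 元のカードにないということはジョーカー
--         # 最終的なジャッジが黒系カード(スペードかクラブ)なら
--         # 黒のジョーカーが代用となった
--         if "S" in b or "C" in b:
--             displays_cards.append("WJB")
--
--         # 元のカードにないということはジョーカー
--         # 最終的なジャッジが赤系カード(ハードかダイヤ)なら
--         # 赤のジョーカーが代用となった
--         elif "H" in b or "D" in b:
--             displays_cards.append("WJR")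
--
--     return displays_cards
-- ===== SOURCE B (Python) =====
-- def best_wild_hand_reflect_hands(cards, bests):
--     # Counter-based multiset matching: one pass over cards, one skip-pass over bests.
--     cnt = {}
--     for b in bests:
--         cnt[b] = cnt.get(b, 0) + 1
--     out = []
--     used = {}
--     for c in cards:
--         if cnt.get(c, 0) > 0:
--             cnt[c] = cnt[c] - 1
--             used[c] = used.get(c, 0) + 1
--             out.append(c)
--     for b in bests:
--         u = used.get(b, 0)
--         if u > 0:
--             used[b] = u - 1
--         elif "S" in b or "C" in b:
--             out.append("WJB")
--         elif "H" in b or "D" in b: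
--             out.append("WJR")
--     return out
-- ===== Notes on version B (the rewrite author's own statement) =====
-- stated objective: faster
-- what changed: Replaced the restart-the-scan while-loop with nested index scans and in-place pops by a counter built once over bests, a single pass over cards emitting matches, and a single skip-pass over bests emitting joker substitutes.
import Mathlib
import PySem

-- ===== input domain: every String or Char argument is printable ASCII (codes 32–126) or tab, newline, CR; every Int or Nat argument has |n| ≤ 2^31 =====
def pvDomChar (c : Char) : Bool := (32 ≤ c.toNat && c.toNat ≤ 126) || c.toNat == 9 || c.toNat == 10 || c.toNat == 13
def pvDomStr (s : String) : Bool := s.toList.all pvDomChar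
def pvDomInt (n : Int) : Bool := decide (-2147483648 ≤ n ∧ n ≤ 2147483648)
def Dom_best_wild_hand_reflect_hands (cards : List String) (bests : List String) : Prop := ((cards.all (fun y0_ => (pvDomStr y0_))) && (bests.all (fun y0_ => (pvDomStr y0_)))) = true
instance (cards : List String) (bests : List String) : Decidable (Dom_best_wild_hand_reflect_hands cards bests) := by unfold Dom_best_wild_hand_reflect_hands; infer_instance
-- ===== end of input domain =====

-- B replaces A's quadratic restart-the-scan matching loop by a counter built once over
-- bests, one pass over cards and one skip-pass over bests (asymptotically faster).

-- ===== PORT A =====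
-- inner 'for y in range(0, len(best_copy)): if card_copy[x] == best_copy[y]' scan: first index of cx in best
def scanY (cx : String) : List String → Option Nat
  | [] => none
  | b :: bs => if cx == b then some 0 else (scanY cx bs).map (· + 1)

-- outer 'for x' loop as structural recursion over card_copy; pop(x)/pop(y) are eraseIdx
def match_original_card : List String → List String → Bool × Option (List String) × Option (List String) × Option String
  | [], _ => (false, none, none, none)
  | c :: cs, best =>
    match scanY c best with
    | some y => (true, some cs, some (best.eraseIdx y), some c)
    | none =>
      let r := match_original_card cs best
      (r.1, r.2.1.map (c :: ·), r.2.2.1, r.2.2.2)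

-- the trailing 'for b in best_copy' joker loop body
def jokerStep (acc : List String) (b : String) : List String :=
  if PySem.Str.isIn "S" b || PySem.Str.isIn "C" b then acc ++ ["WJB"]
  else if PySem.Str.isIn "H" b || PySem.Str.isIn "D" b then acc ++ ["WJR"]
  else acc

-- 'while True' loop; fuel = cards.length + 1 only totalizes it (each successful match pops one card)
def loopA : Nat → List String → List String → List String → List String × List String
  | 0, _, best, disp => (disp, best)
  | fuel + 1, card, best, disp =>
    match match_original_card card best with
    | (true, some cc, some bb, some e) => loopA fuel cc bb (disp ++ [e])
    | _ => (disp, best)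

def best_wild_hand_reflect_hands (cards : List String) (bests : List String) : List String :=
  let r := loopA (cards.length + 1) cards bests []
  r.2.foldl jokerStep r.1

-- ===== PORT B =====
def best_wild_hand_reflect_hands_alt (cards : List String) (bests : List String) : List String :=
  let cnt : PySem.Dict String Int := bests.foldl (fun d b => d.insert b (d.getD b 0 + 1)) PySem.Dict.empty
  let st := cards.foldl
    (fun (st : PySem.Dict String Int × PySem.Dict String Int × List String) c =>
      if st.1.getD c 0 > 0 then
        (st.1.insert c (st.1.getD c 0 - 1), st.2.1.insert c (st.2.1.getD c 0 + 1), st.2.2 ++ [c])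
      else st)
    (cnt, PySem.Dict.empty, ([] : List String))
  (bests.foldl
    (fun (st : PySem.Dict String Int × List String) b =>
      let u := st.1.getD b 0
      if u > 0 then (st.1.insert b (u - 1), st.2)
      else if PySem.Str.isIn "S" b || PySem.Str.isIn "C" b then (st.1, st.2 ++ ["WJB"])
      else if PySem.Str.isIn "H" b || PySem.Str.isIn "D" b then (st.1, st.2 ++ ["WJR"])
      else st)
    (st.2.1, st.2.2)).2

-- ===== PRECONDITION & SPEC =====
def Spec_best_wild_hand_reflect_hands (cards : List String) (bests : List String) (out : List String) : Prop := out = best_wild_hand_reflect_hands_alt cards bests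
instance (cards : List String) (bests : List String) (out : List String) : Decidable (Spec_best_wild_hand_reflect_hands cards bests out) := by unfold Spec_best_wild_hand_reflect_hands; infer_instance

-- ===== CLAIM (what is proved, stated in full; the proofs are below) =====
def Claim_equal_best_wild_hand_reflect_hands : Prop := ∀ (cards : List String) (bests : List String), Dom_best_wild_hand_reflect_hands cards bests → Spec_best_wild_hand_reflect_hands cards bests (best_wild_hand_reflect_hands cards bests)

-- ===== LEMMAS AND PROOFS =====

-- named copies of B's three loop bodies (let-free; definitionally equal to the port's lambdas)
def cntStep (d : PySem.Dict String Int) (b : String) : PySem.Dict String Int :=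
  d.insert b (d.getD b 0 + 1)

def mainStep (st : PySem.Dict String Int × PySem.Dict String Int × List String) (c : String) :
    PySem.Dict String Int × PySem.Dict String Int × List String :=
  if st.1.getD c 0 > 0 then
    (st.1.insert c (st.1.getD c 0 - 1), st.2.1.insert c (st.2.1.getD c 0 + 1), st.2.2 ++ [c])
  else st

def finStep (st : PySem.Dict String Int × List String) (b : String) : PySem.Dict String Int × List String :=
  if st.1.getD b 0 > 0 then (st.1.insert b (st.1.getD b 0 - 1), st.2)
  else if PySem.Str.isIn "S" b || PySem.Str.isIn "C" b then (st.1, st.2 ++ ["WJB"])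
  else if PySem.Str.isIn "H" b || PySem.Str.isIn "D" b then (st.1, st.2 ++ ["WJR"])
  else st

-- the common abstraction: left-to-right greedy multiset matching
-- (matched cards in card order, surviving bests after first-occurrence erasures)
def fA : List String → List String → List String × List String
  | [], best => ([], best)
  | c :: cs, best =>
    if c ∈ best then
      let r := fA cs (best.erase c)
      (c :: r.1, r.2)
    else fA cs best

-- skip, for each value v, the first (k v) occurrences of v
def dropPass (k : String → Int) : List String → List String
  | [] => []
  | b :: bs => if k b > 0 then dropPass (fun v => if v = b then k v - 1 else k v) bs
               else b :: dropPass k bs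

theorem dropPass_congr (k k' : String → Int) (l : List String) (h : ∀ v, k v = k' v) :
    dropPass k l = dropPass k' l := by
  induction l generalizing k k' with
  | nil => rfl
  | cons b bs ih =>
    simp only [dropPass, h b]
    split
    · exact ih _ _ (fun v => by by_cases hv : v = b <;> simp [hv, h v, h b])
    · rw [ih _ _ h]

theorem dropPass_zero (l : List String) : dropPass (fun _ => 0) l = l := by
  induction l with
  | nil => rfl
  | cons b bs ih => simpa [dropPass] using ih

theorem scanY_eq_none (c : String) (best : List String) (h : c ∉ best) : scanY c best = none := by
  induction best with
  | nil => rfl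
  | cons b bs ih =>
    simp only [List.mem_cons, not_or] at h
    simp [scanY, h.1, ih h.2]

theorem exists_scanY_of_mem (c : String) (best : List String) (h : c ∈ best) :
    ∃ y, scanY c best = some y ∧ best.eraseIdx y = best.erase c := by
  induction best with
  | nil => simp at h
  | cons b bs ih =>
    by_cases hb : c = b
    · exact ⟨0, by simp [scanY, hb], by simp [hb, List.erase_cons_head]⟩
    · have hm : c ∈ bs := by
        rcases List.mem_cons.mp h with h1 | h1
        · exact absurd h1 hb
        · exact h1
      obtain ⟨y, hy, he⟩ := ih hm
      refine ⟨y + 1, by simp [scanY, hb, hy], ?_⟩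
      have hbc : ¬ b = c := fun e => hb e.symm
      simp [List.eraseIdx, hbc, he]

theorem match_shape (card best : List String) :
    match_original_card card best = (false, none, none, none) ∨
    ∃ cc bb e, match_original_card card best = (true, some cc, some bb, some e) ∧ bb.Sublist best := by
  induction card with
  | nil => left; rfl
  | cons c cs ih =>
    cases h : scanY c best with
    | some y =>
      right
      exact ⟨cs, best.eraseIdx y, c, by simp [match_original_card, h], List.eraseIdx_sublist _ _⟩
    | none =>
      rcases ih with h0 | ⟨cc, bb, e, h1, h2⟩
      · left; simp [match_original_card, h, h0]
      · right; exact ⟨c :: cc, bb, e, by simp [match_original_card, h, h1], h2⟩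

theorem loopA_skip (fuel : Nat) (c : String) (cs best disp : List String) (h : c ∉ best) :
    loopA fuel (c :: cs) best disp = loopA fuel cs best disp := by
  induction fuel generalizing cs best disp with
  | zero => rfl
  | succ n ih =>
    have hs := scanY_eq_none c best h
    rcases match_shape cs best with h0 | ⟨cc, bb, e, h1, h2⟩
    · simp [loopA, match_original_card, hs, h0]
    · have hcb : c ∉ bb := fun hm => h (h2.subset hm)
      simp [loopA, match_original_card, hs, h1, ih _ _ _ hcb]

theorem loopA_eq_fA (cards : List String) : ∀ fuel, cards.length ≤ fuel → ∀ best disp,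
    loopA (fuel + 1) cards best disp = (disp ++ (fA cards best).1, (fA cards best).2) := by
  induction cards with
  | nil => intro fuel _ best disp; simp [loopA, match_original_card, fA]
  | cons c cs ih =>
    intro fuel hf best disp
    by_cases hc : c ∈ best
    · obtain ⟨y, hy, he⟩ := exists_scanY_of_mem c best hc
      obtain ⟨fuel', rfl⟩ : ∃ f', fuel = f' + 1 := by
        cases fuel with
        | zero => simp at hf
        | succ n => exact ⟨n, rfl⟩
      have hf' : cs.length ≤ fuel' := by simpa using hf
      have hstep : loopA (fuel' + 1 + 1) (c :: cs) best disp
          = loopA (fuel' + 1) cs (best.eraseIdx y) (disp ++ [c]) := by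
        simp [loopA, match_original_card, hy]
      rw [hstep, he, ih fuel' hf' (best.erase c) (disp ++ [c])]
      simp [fA, hc]
    · rw [loopA_skip, ih fuel (by simp at hf; omega) best disp]
      · simp [fA, hc]
      · exact hc

-- B's matching pass tracked against fA: cnt counts the surviving bests, used counts the consumed ones
theorem mainFold_spec (cards : List String) :
    ∀ (cnt used : PySem.Dict String Int) (out best : List String),
    (∀ v, cnt.getD v 0 = (best.count v : Int)) →
    (cards.foldl mainStep (cnt, used, out)).2.2 = out ++ (fA cards best).1 ∧
    (∀ v, (cards.foldl mainStep (cnt, used, out)).2.1.getD v 0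
        = used.getD v 0 + ((best.count v : Int) - ((fA cards best).2.count v : Int))) := by
  induction cards with
  | nil => intro cnt used out best hcnt; simp [fA]
  | cons c cs ih =>
    intro cnt used out best hcnt
    by_cases hc : c ∈ best
    · have hpos : cnt.getD c 0 > 0 := by
        rw [hcnt c]; exact_mod_cast List.count_pos_iff.mpr hc
      have h1c : 1 ≤ best.count c := List.count_pos_iff.mpr hc
      have hcnt' : ∀ v, (cnt.insert c (cnt.getD c 0 - 1)).getD v 0 = ((best.erase c).count v : Int) := by
        intro v
        rw [PySem.Dict.getD_insert]
        by_cases hv : v = c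
        · subst hv
          rw [if_pos rfl, hcnt v, List.count_erase_self, Nat.cast_sub h1c]
          simp
        · rw [if_neg hv, hcnt v, List.count_erase_of_ne hv]
      obtain ⟨h1, h3⟩ := ih (cnt.insert c (cnt.getD c 0 - 1)) (used.insert c (used.getD c 0 + 1))
        (out ++ [c]) (best.erase c) hcnt'
      have hst : mainStep (cnt, used, out) c
          = (cnt.insert c (cnt.getD c 0 - 1), used.insert c (used.getD c 0 + 1), out ++ [c]) := by
        simp [mainStep, hpos]
      have hfa : fA (c :: cs) best = (c :: (fA cs (best.erase c)).1, (fA cs (best.erase c)).2) := by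
        simp [fA, hc]
      constructor
      · rw [List.foldl_cons, hst, h1, hfa]; simp
      · intro v
        rw [List.foldl_cons, hst, h3 v, hfa, PySem.Dict.getD_insert]
        by_cases hv : v = c
        · subst hv
          rw [if_pos rfl, List.count_erase_self, Nat.cast_sub h1c]
          push_cast; ring
        · rw [if_neg hv, List.count_erase_of_ne hv]
    · have hnpos : ¬ cnt.getD c 0 > 0 := by
        rw [hcnt c]
        simp [List.count_eq_zero_of_not_mem hc]
      obtain ⟨h1, h3⟩ := ih cnt used out best hcnt
      have hst : mainStep (cnt, used, out) c = (cnt, used, out) := by simp [mainStep, hnpos]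
      have hfa : fA (c :: cs) best = fA cs best := by simp [fA, hc]
      exact ⟨by rw [List.foldl_cons, hst, h1, hfa], fun v => by rw [List.foldl_cons, hst, h3 v, hfa]⟩

-- bumping the skip count of a value present in the survivors erases its first surviving occurrence
theorem dropPass_bump (l : List String) : ∀ (k : String → Int) (c : String), 0 ≤ k c →
    c ∈ dropPass k l →
    dropPass (fun v => if v = c then k v + 1 else k v) l = (dropPass k l).erase c := by
  induction l with
  | nil => intro k c _ hm; simp [dropPass] at hm
  | cons b bs ih =>
    intro k c hk hm
    by_cases hb : k b > 0
    · have hb' : (if b = c then k b + 1 else k b) > 0 := by split <;> omega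
      simp only [dropPass, if_pos hb, if_pos hb'] at hm ⊢
      have heq : ∀ v, (if v = b then (if v = c then k v + 1 else k v) - 1 else (if v = c then k v + 1 else k v))
          = (if v = c then (if v = b then k v - 1 else k v) + 1 else (if v = b then k v - 1 else k v)) := by
        intro v; split_ifs <;> omega
      rw [dropPass_congr _ _ bs heq]
      have hk' : 0 ≤ (if c = b then k c - 1 else k c) := by
        by_cases h1 : c = b
        · rw [if_pos h1, h1]; omega
        · rw [if_neg h1]; exact hk
      exact ih _ c hk' hm
    · simp only [dropPass, if_neg hb] at hm ⊢
      by_cases hbc : b = c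
      · subst hbc
        have hkb : k b = 0 := by omega
        rw [if_pos (by simp [hkb] : (if b = b then k b + 1 else k b) > 0)]
        rw [List.erase_cons_head]
        exact dropPass_congr _ _ bs (fun v => by by_cases hv : v = b <;> simp [hv, hkb])
      · rw [if_neg (by simpa [hbc] using hb : ¬ (if b = c then k b + 1 else k b) > 0)]
        have hm' : c ∈ dropPass k bs := by
          rcases List.mem_cons.mp hm with h1 | h1
          · exact absurd h1.symm hbc
          · exact h1
        rw [List.erase_cons_tail (by simp [hbc])]
        rw [ih k c hk hm']

theorem dropPass_fA (cards : List String) : ∀ (best l : List String) (k : String → Int),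
    (∀ v, 0 ≤ k v) → dropPass k l = best →
    dropPass (fun v => k v + ((best.count v : Int) - ((fA cards best).2.count v : Int))) l
      = (fA cards best).2 := by
  induction cards with
  | nil =>
    intro best l k _ hdl
    rw [dropPass_congr _ k l (fun v => by simp [fA]), hdl]
    simp [fA]
  | cons c cs ih =>
    intro best l k hk hdl
    by_cases hc : c ∈ best
    · have hbump : dropPass (fun v => if v = c then k v + 1 else k v) l = best.erase c := by
        rw [dropPass_bump l k c (hk c) (by rw [hdl]; exact hc), hdl]
      have hk' : ∀ v, 0 ≤ (if v = c then k v + 1 else k v) := by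
        intro v; have := hk v; split <;> omega
      have hrec := ih (best.erase c) l _ hk' hbump
      have hfa : (fA (c :: cs) best).2 = (fA cs (best.erase c)).2 := by simp [fA, hc]
      rw [hfa]
      refine Eq.trans (dropPass_congr _ _ l ?_) hrec
      intro v
      by_cases hv : v = c
      · subst hv
        have h1 : 1 ≤ best.count v := List.count_pos_iff.mpr hc
        rw [if_pos rfl, List.count_erase_self, Nat.cast_sub h1]
        push_cast; ring
      · rw [if_neg hv, List.count_erase_of_ne hv]
    · have hfa : fA (c :: cs) best = fA cs best := by simp [fA, hc]
      rw [hfa]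
      exact ih best l k hk hdl

-- B's final pass over bests = the joker fold over the surviving bests
theorem finFold_spec (l : List String) : ∀ (used : PySem.Dict String Int) (out : List String) (k : String → Int),
    (∀ v, used.getD v 0 = k v) →
    (l.foldl finStep (used, out)).2 = (dropPass k l).foldl jokerStep out := by
  induction l with
  | nil => intro used out k _; rfl
  | cons b bs ih =>
    intro used out k hused
    by_cases hb : k b > 0
    · have hu : used.getD b 0 > 0 := by rw [hused b]; exact hb
      have hst : finStep (used, out) b = (used.insert b (used.getD b 0 - 1), out) := by
        simp [finStep, hu]
      rw [List.foldl_cons, hst]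
      rw [show dropPass k (b :: bs) = dropPass (fun v => if v = b then k v - 1 else k v) bs from by
        simp [dropPass, hb]]
      apply ih
      intro v
      rw [PySem.Dict.getD_insert]
      by_cases hv : v = b
      · subst hv; rw [if_pos rfl, if_pos rfl, hused v]
      · rw [if_neg hv, if_neg hv, hused v]
    · have hu : ¬ used.getD b 0 > 0 := by rw [hused b]; exact hb
      have hst : finStep (used, out) b = (used, jokerStep out b) := by
        simp only [finStep, jokerStep, if_neg hu]
        split
        · rfl
        · split <;> rfl
      rw [List.foldl_cons, hst]
      rw [show dropPass k (b :: bs) = b :: dropPass k bs from by simp [dropPass, hb]]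
      rw [List.foldl_cons]
      exact ih used (jokerStep out b) k hused

theorem alt_eq_fA (cards bests : List String) :
    best_wild_hand_reflect_hands_alt cards bests
      = (fA cards bests).2.foldl jokerStep (fA cards bests).1 := by
  have hrfl : best_wild_hand_reflect_hands_alt cards bests
      = (bests.foldl finStep
          ((cards.foldl mainStep (bests.foldl cntStep PySem.Dict.empty, PySem.Dict.empty, ([] : List String))).2.1,
           (cards.foldl mainStep (bests.foldl cntStep PySem.Dict.empty, PySem.Dict.empty, ([] : List String))).2.2)).2 := rfl
  rw [hrfl]
  have hcnt : ∀ v, (bests.foldl cntStep PySem.Dict.empty).getD v 0 = (bests.count v : Int) := by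
    intro v
    unfold cntStep
    rw [PySem.Dict.getD_foldl_insert_add_one]
    simp
  obtain ⟨h1, h3⟩ := mainFold_spec cards (bests.foldl cntStep PySem.Dict.empty)
    PySem.Dict.empty [] bests hcnt
  rw [finFold_spec bests _ _
      (fun v => (bests.count v : Int) - ((fA cards bests).2.count v : Int))
      (fun v => by rw [h3 v]; simp), h1]
  have hd : dropPass (fun v => (bests.count v : Int) - ((fA cards bests).2.count v : Int)) bests
      = (fA cards bests).2 := by
    have h0 := dropPass_fA cards bests bests (fun _ => 0) (fun _ => le_refl 0) (dropPass_zero bests)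
    refine Eq.trans (dropPass_congr _ _ bests ?_) h0
    intro v; ring
  rw [hd]
  simp

-- ===== VERDICT (by name: the statement is the Claim_ definition above) =====
theorem best_wild_hand_reflect_hands_spec : Claim_equal_best_wild_hand_reflect_hands := by
  intro cards bests _
  unfold Spec_best_wild_hand_reflect_hands
  rw [alt_eq_fA]
  unfold best_wild_hand_reflect_hands
  rw [loopA_eq_fA cards cards.length (le_refl _) bests []]
  simp
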